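-- pv_equiv track=rewrite | github.com/AbedAmouneh/shrmtool | utils/url_utils.py | _is_social_media_domain
-- ===== SOURCE A (Python) =====
-- SOCIAL_MEDIA_DOMAINS = {
--     "youtube.com",
--     "youtu.be",
--     "twitter.com",
--     "x.com",
--     "facebook.com",
--     "linkedin.com",
--     "instagram.com",
--     "reddit.com",
--     "tiktok.com",
-- }
--
-- def _is_social_media_domain(hostname: str) -> bool:
--     """
--     Check if a hostname belongs to a social media or video platform.
--
--     Args:
--         hostname: Lowercase hostname (e.g., "youtube.com")
--
--     Returns:
--         True if the domain is a social media/video platform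
--     """
--     if not hostname:
--         return False
--
--     # Remove www. prefix if present
--     domain = hostname.replace("www.", "")
--
--     # Check exact match or subdomain
--     for social_domain in SOCIAL_MEDIA_DOMAINS:
--         if domain == social_domain or domain.endswith(f".{social_domain}"):
--             return True
--
--     return False
-- ===== SOURCE B (Python) =====
-- SOCIAL_MEDIA_DOMAINS = {
--     "youtube.com",
--     "youtu.be",
--     "twitter.com",
--     "x.com",
--     "facebook.com",
--     "linkedin.com",
--     "instagram.com",
--     "reddit.com",
--     "tiktok.com",
-- }
--
-- def _is_social_media_domain(hostname: str) -> bool: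
--     """Suffix-scan re-implementation: walk the hostname's dot boundaries and
--     look each suffix up in the set, instead of scanning the set with string
--     comparisons."""
--     if not hostname:
--         return False
--     domain = hostname.replace("www.", "")
--     if domain in SOCIAL_MEDIA_DOMAINS:
--         return True
--     for i in range(1, len(domain) + 1):
--         if domain[i - 1] == '.' and domain[i:] in SOCIAL_MEDIA_DOMAINS:
--             return True
--     return False
-- ===== Notes on version B (the rewrite author's own statement) =====
-- stated objective: alternative
-- what changed: Instead of scanning the 9-element domain set with equality/endswith string comparisons, B walks the hostname's dot boundaries and looks each dot-delimited suffix up in the set.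
import Mathlib
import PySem

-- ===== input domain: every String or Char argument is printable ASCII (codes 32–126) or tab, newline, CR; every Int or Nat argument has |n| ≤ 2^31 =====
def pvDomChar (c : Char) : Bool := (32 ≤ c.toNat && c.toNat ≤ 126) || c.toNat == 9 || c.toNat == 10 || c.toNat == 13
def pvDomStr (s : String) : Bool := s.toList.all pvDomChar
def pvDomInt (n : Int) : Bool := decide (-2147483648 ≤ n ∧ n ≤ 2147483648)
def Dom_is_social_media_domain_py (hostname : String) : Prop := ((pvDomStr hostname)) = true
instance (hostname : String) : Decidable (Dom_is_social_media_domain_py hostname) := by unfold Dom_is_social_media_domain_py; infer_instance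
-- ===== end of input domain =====

-- B replaces A's scan over the domain set (equality/endswith per element) by a walk over the
-- hostname's dot boundaries with a set lookup per dot-delimited suffix (objective: alternative).

-- ===== PORT A =====
def socialDomains : List (List Char) :=
  ["youtube.com".toList, "youtu.be".toList, "twitter.com".toList, "x.com".toList,
   "facebook.com".toList, "linkedin.com".toList, "instagram.com".toList,
   "reddit.com".toList, "tiktok.com".toList]

def is_social_media_domain_py (hostname : String) : Bool :=
  if hostname.toList == [] then false
  else
    let domain := PySem.Chars.replace hostname.toList "www.".toList []
    socialDomains.any (fun d => domain == d || PySem.Chars.endswith domain ('.' :: d))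

-- ===== PORT B =====
-- the loop 'for i in range(1, len(domain)+1): if domain[i-1]=='.' and domain[i:] in S'
def dotSuffixHit : List Char → Bool
  | [] => false
  | c :: rest => (c == '.' && socialDomains.contains rest) || dotSuffixHit rest

def is_social_media_domain_py_alt (hostname : String) : Bool :=
  if hostname.toList == [] then false
  else
    let domain := PySem.Chars.replace hostname.toList "www.".toList []
    socialDomains.contains domain || dotSuffixHit domain

-- ===== PRECONDITION & SPEC =====
def Spec_is_social_media_domain_py (hostname : String) (out : Bool) : Prop := out = is_social_media_domain_py_alt hostname
instance (hostname : String) (out : Bool) : Decidable (Spec_is_social_media_domain_py hostname out) := by unfold Spec_is_social_media_domain_py; infer_instance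

-- ===== CLAIM (what is proved, stated in full; the proofs are below) =====
def Claim_equal_is_social_media_domain_py : Prop := ∀ (hostname : String), Dom_is_social_media_domain_py hostname → Spec_is_social_media_domain_py hostname (is_social_media_domain_py hostname)

-- ===== LEMMAS AND PROOFS =====

theorem any_or_split {α : Type} (S : List α) (p q : α → Bool) :
    (S.any fun d => p d || q d) = (S.any p || S.any q) := by
  induction S with
  | nil => simp
  | cons a S ih => simp [List.any_cons, ih, Bool.or_assoc, Bool.or_left_comm]

theorem any_beq (S : List (List Char)) (cs : List Char) :
    (S.any fun d => cs == d) = S.contains cs := by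
  induction S with
  | nil => simp
  | cons a S ih =>
    rw [List.any_cons, ih, Bool.eq_iff_iff]
    simp

theorem any_cons_beq (S : List (List Char)) (c : Char) (rest : List Char) :
    (S.any fun d => (('.' :: d : List Char) == c :: rest)) = (c == '.' && S.contains rest) := by
  induction S with
  | nil => simp
  | cons a S ih =>
    rw [List.any_cons, ih, Bool.eq_iff_iff]
    by_cases hc : c = '.' <;> by_cases ha : rest = a <;>
      simp [hc, ha] <;> tauto

theorem endswith_cons (c : Char) (rest d : List Char) :
    PySem.Chars.endswith (c :: rest) ('.' :: d)
      = ((('.' :: d : List Char) == c :: rest) || PySem.Chars.endswith rest ('.' :: d)) := by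
  rw [Bool.eq_iff_iff]
  simp [PySem.Chars.endswith_iff, List.suffix_cons_iff]

theorem any_endswith (cs : List Char) :
    (socialDomains.any fun d => PySem.Chars.endswith cs ('.' :: d)) = dotSuffixHit cs := by
  induction cs with
  | nil => decide
  | cons c rest ih =>
    have h : (fun d : List Char => PySem.Chars.endswith (c :: rest) ('.' :: d))
        = fun d => ((('.' :: d : List Char) == c :: rest) || PySem.Chars.endswith rest ('.' :: d)) :=
      funext fun d => endswith_cons c rest d
    rw [h, any_or_split, any_cons_beq, ih]
    rfl

theorem loops_agree (cs : List Char) :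
    (socialDomains.any fun d => cs == d || PySem.Chars.endswith cs ('.' :: d))
      = (socialDomains.contains cs || dotSuffixHit cs) := by
  rw [any_or_split, any_beq, any_endswith]

-- ===== VERDICT (by name: the statement is the Claim_ definition above) =====
theorem is_social_media_domain_py_spec : Claim_equal_is_social_media_domain_py := by
  intro hostname _
  unfold Spec_is_social_media_domain_py
  by_cases h : hostname.toList == []
  · simp [is_social_media_domain_py, is_social_media_domain_py_alt, h]
  · simp only [is_social_media_domain_py, is_social_media_domain_py_alt, h, if_neg, Bool.false_eq_true, not_false_iff]
    exact loops_agree _
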